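-- pv_equiv track=rewrite | github.com/ItsReallyDanii/BettingBall | src/data_quality.py | _check_duplicates
-- ===== SOURCE A (Python) =====
-- from typing import List, Dict, Any, Tuple
--
-- def _check_duplicates(targets: List[Dict[str, Any]]) -> List[str]:
--     seen = set()
--     dupes = 0
--     for t in targets:
--         # Key: game_id, player_id, event_type, horizon
--         key = (t.get("game_id"), t.get("player_id"), t.get("event_type"), t.get("horizon", "pregame"))
--         if key in seen:
--             dupes += 1
--         seen.add(key)
--
--     if dupes > 0:
--         return [f"Targets: Found {dupes} duplicate keys (game_id, player_id, event_type, horizon)"]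
--     return []
-- ===== SOURCE B (Python) =====
-- def _check_duplicates(targets):
--     keys = [
--         (t.get("game_id"), t.get("player_id"), t.get("event_type"), t.get("horizon", "pregame"))
--         for t in targets
--     ]
--     dupes = sum(keys.count(k) - 1 for k in dict.fromkeys(keys))
--     if dupes > 0:
--         return [f"Targets: Found {dupes} duplicate keys (game_id, player_id, event_type, horizon)"]
--     return []
-- ===== Notes on version B (the rewrite author's own statement) =====
-- stated objective: alternative
-- what changed: Replaces A's single incremental seen-set/counter pass with a staged computation: build the key list, deduplicate it preserving first occurrences, then for each distinct key scan the list to count its occurrences and sum the excesses (count - 1); no per-element membership test or running counter remains.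
import Mathlib
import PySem

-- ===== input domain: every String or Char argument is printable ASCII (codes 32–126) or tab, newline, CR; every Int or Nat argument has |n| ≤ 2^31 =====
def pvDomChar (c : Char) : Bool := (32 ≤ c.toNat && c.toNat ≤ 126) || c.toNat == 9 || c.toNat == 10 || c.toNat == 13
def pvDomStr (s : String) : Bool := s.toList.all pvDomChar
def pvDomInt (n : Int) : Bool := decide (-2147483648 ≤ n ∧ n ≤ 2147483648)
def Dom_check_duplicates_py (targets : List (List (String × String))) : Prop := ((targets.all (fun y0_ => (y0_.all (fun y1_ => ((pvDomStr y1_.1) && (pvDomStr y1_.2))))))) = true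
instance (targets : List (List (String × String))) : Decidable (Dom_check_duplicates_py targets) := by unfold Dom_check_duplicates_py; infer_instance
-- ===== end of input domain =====

-- B replaces A's incremental seen-set/counter pass by dedup-then-count: for each distinct
-- key (first-occurrence order) scan the key list and sum the excess counts; objective: alternative.

-- ===== PORT A =====
-- The duplicate key tuple: (t.get("game_id"), t.get("player_id"), t.get("event_type"), t.get("horizon", "pregame"))
def pvKey (t : List (String × String)) : Option String × Option String × Option String × String :=
  ((PySem.Dict.mk t).get? "game_id", (PySem.Dict.mk t).get? "player_id",
   (PySem.Dict.mk t).get? "event_type", (PySem.Dict.mk t).getD "horizon" "pregame")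

-- The message f-string for a given dupes count
def pvMsg (dupes : Int) : String :=
  "Targets: Found " ++ PySem.Int.toStr dupes ++ " duplicate keys (game_id, player_id, event_type, horizon)"

def check_duplicates_py (targets : List (List (String × String))) : List String :=
  let st := targets.foldl
    (fun (st : PySem.Set (Option String × Option String × Option String × String) × Int) t =>
      let key := pvKey t
      let dupes := if st.1.contains key then st.2 + 1 else st.2
      (st.1.add key, dupes))
    (PySem.Set.empty, 0)
  if st.2 > 0 then [pvMsg st.2] else []

-- ===== PORT B =====
def check_duplicates_py_alt (targets : List (List (String × String))) : List String :=
  let keys := targets.map pvKey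
  let dupes : Int := ((PySem.List.dedup keys).map (fun k => (PySem.List.count keys k : Int) - 1)).sum
  if dupes > 0 then [pvMsg dupes] else []

-- ===== PRECONDITION & SPEC =====
def Spec_check_duplicates_py (targets : List (List (String × String))) (out : List String) : Prop := out = check_duplicates_py_alt targets
instance (targets : List (List (String × String))) (out : List String) : Decidable (Spec_check_duplicates_py targets out) := by unfold Spec_check_duplicates_py; infer_instance

-- ===== CLAIM =====
def Claim_equal_check_duplicates_py : Prop := ∀ (targets : List (List (String × String))), Dom_check_duplicates_py targets → Spec_check_duplicates_py targets (check_duplicates_py targets)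

-- ===== LEMMAS AND PROOFS =====

-- Loop invariant for A's fold: the running dupes counter equals
-- (elements consumed) + |initial seen| - |seen updated with all consumed keys|.
theorem pv_loop (l : List (List (String × String)))
    (s : PySem.Set (Option String × Option String × Option String × String)) (c : Int) :
    (l.foldl
      (fun (st : PySem.Set (Option String × Option String × Option String × String) × Int) t =>
        let key := pvKey t
        let dupes := if st.1.contains key then st.2 + 1 else st.2
        (st.1.add key, dupes))
      (s, c)).2
      = c + (l.length : Int) + (s.length : Int)
        - ((PySem.Set.update s (l.map pvKey)).length : Int) := by
  induction l generalizing s c with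
  | nil => simp [PySem.Set.update]
  | cons a l ih =>
    simp only [List.foldl_cons, List.map_cons, List.length_cons]
    by_cases h : s.contains (pvKey a) = true
    · have hm : pvKey a ∈ s := by simpa using h
      rw [show (if s.contains (pvKey a) then c + 1 else c) = c + 1 by simp [hm]]
      rw [ih]
      have hadd : s.add (pvKey a) = s := by simp [PySem.Set.add, hm]
      rw [hadd]
      have : PySem.Set.update s (pvKey a :: l.map pvKey)
          = PySem.Set.update (s.add (pvKey a)) (l.map pvKey) := rfl
      rw [this, hadd]
      push_cast; ring
    · have hm : pvKey a ∉ s := by simpa using h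
      rw [show (if s.contains (pvKey a) then c + 1 else c) = c by simp [hm]]
      rw [ih]
      have hadd : s.add (pvKey a) = s ++ [pvKey a] := by
        simp [PySem.Set.add, hm]
      have : PySem.Set.update s (pvKey a :: l.map pvKey)
          = PySem.Set.update (s.add (pvKey a)) (l.map pvKey) := rfl
      rw [this, hadd]
      simp only [List.length_append, List.length_singleton]
      push_cast; ring

-- B's aggregate: summing (count k - 1) over the deduplicated keys equals len - |distinct|.
theorem pv_sum_counts {α : Type} [BEq α] [LawfulBEq α] [DecidableEq α] (l : List α) :
    ((PySem.Set.ofList l).map (fun k => (List.count k l : Int) - 1)).sum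
      = (l.length : Int) - ((PySem.Set.ofList l).length : Int) := by
  have hperm : (PySem.Set.ofList l).Perm l.dedup := by
    apply List.perm_of_nodup_nodup_toFinset_eq
    · exact PySem.Set.nodup_ofList l
    · exact l.nodup_dedup
    · ext x
      simp [PySem.Set.mem_ofList, List.mem_dedup]
  have hsum : ((PySem.Set.ofList l).map (fun k => (List.count k l : Int))).sum
      = (l.dedup.map (fun k => (List.count k l : Int))).sum :=
    (hperm.map _).sum_eq
  have hlen : (PySem.Set.ofList l).length = l.dedup.length := hperm.length_eq
  have hinst : (instBEqOfDecidableEq : BEq α) = ‹BEq α› := lawful_beq_subsingleton _ _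
  have hbase : (l.dedup.map (fun k => l.count k)).sum = l.length := by
    have h := l.sum_map_count_dedup_eq_length
    rw [hinst] at h
    exact h
  have hshift : ((PySem.Set.ofList l).map (fun k => (List.count k l : Int) - 1)).sum
      = ((PySem.Set.ofList l).map (fun k => (List.count k l : Int))).sum
        - ((PySem.Set.ofList l).length : Int) := by
    induction PySem.Set.ofList l with
    | nil => simp
    | cons a t ih => simp [ih]; ring
  rw [hshift, hsum, hlen]
  have hcast : (l.dedup.map (fun k => (List.count k l : Int))).sum = (l.length : Int) := by
    calc (l.dedup.map (fun k => (List.count k l : Int))).sum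
        = ((l.dedup.map (fun k => l.count k)).map (fun n : Nat => (n : Int))).sum := by
          rw [List.map_map]; rfl
      _ = ((l.dedup.map (fun k => l.count k)).sum : Int) := (Nat.cast_list_sum _).symm
      _ = (l.length : Int) := by rw [hbase]
  rw [hcast]

-- ===== VERDICT =====
theorem check_duplicates_py_spec : Claim_equal_check_duplicates_py := by
  intro targets _
  show check_duplicates_py targets = check_duplicates_py_alt targets
  simp only [check_duplicates_py, check_duplicates_py_alt, pv_loop, PySem.List.count_eq,
             PySem.List.dedup_eq_ofList, pv_sum_counts]
  rw [show PySem.Set.update PySem.Set.empty (targets.map pvKey)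
        = PySem.Set.ofList (targets.map pvKey) from (PySem.Set.ofList_eq_foldl _).symm]
  simp [PySem.Set.empty]
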